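-- pv_equiv track=rewrite | github.com/daniel-reich/turbo-robot | 3dECspHz4fD7ijhky_9.py | numbers_range
-- ===== SOURCE A (Python) =====
-- def numbers_range(lst):
--   if lst:
--     s=str(lst[0])
--     for i in range(1,len(lst)):
--       if lst[i-1]+1==lst[i]:
--         s+='#'+str(lst[i])
--       else:
--         s+=' '+str(lst[i])
--     A=[x.split('#') for x in s.split()]
--     res=''
--     for x in A:
--       if len(x)<3:
--         res+=', '+', '.join(x)
--       else:
--         res+=', '+x[0]+'-'+x[-1]
--     return res[2:]
--   else:
--     return ''
-- ===== SOURCE B (Python) =====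
-- def numbers_range(lst):
--     tokens = []
--     i = 0
--     n = len(lst)
--     while i < n:
--         j = i + 1
--         while j < n and lst[j - 1] + 1 == lst[j]:
--             j += 1
--         run = lst[i:j]
--         if len(run) >= 3:
--             tokens.append(str(run[0]) + '-' + str(run[-1]))
--         else:
--             tokens += [str(x) for x in run]
--         i = j
--     return ', '.join(tokens)
-- ===== Notes on version B (the rewrite author's own statement) =====
-- stated objective: simpler
-- what changed: A builds a '#'/space-delimited string from the list, splits it twice to recover the runs, and reassembles through a ', '-prefixed accumulator; B extracts the runs of consecutive integers directly in one pass over the list and joins the tokens with ', '.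
import Mathlib
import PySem

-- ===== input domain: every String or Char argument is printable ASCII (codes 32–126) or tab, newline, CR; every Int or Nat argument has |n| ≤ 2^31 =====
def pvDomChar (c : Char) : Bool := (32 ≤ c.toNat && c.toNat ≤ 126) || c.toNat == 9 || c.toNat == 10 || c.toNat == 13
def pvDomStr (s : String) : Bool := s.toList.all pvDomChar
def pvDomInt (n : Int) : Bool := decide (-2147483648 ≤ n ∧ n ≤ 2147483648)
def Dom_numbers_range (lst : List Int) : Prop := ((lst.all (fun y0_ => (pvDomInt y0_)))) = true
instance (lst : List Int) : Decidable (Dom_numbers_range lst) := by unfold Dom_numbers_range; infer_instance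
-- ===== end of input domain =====

-- B replaces A's build-a-'#'/space-delimited-string-then-split-it-again pipeline by one direct
-- pass that extracts the runs of consecutive integers and joins their tokens (objective: simpler).

-- ===== PORT A =====
def numbers_range (lst : List Int) : String :=
  match lst with
  | [] => ""
  | x :: _ =>
    -- s = str(lst[0]); for i in range(1, len(lst)): s += ('#' or ' ') + str(lst[i])
    let s : List Char :=
      (PySem.List.pyRange 1 (lst.length : Int) 1).foldl
        (fun s i =>
          if PySem.List.pyGetD lst (i - 1) 0 + 1 = PySem.List.pyGetD lst i 0 then
            s ++ ['#'] ++ PySem.Int.toChars (PySem.List.pyGetD lst i 0)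
          else
            s ++ [' '] ++ PySem.Int.toChars (PySem.List.pyGetD lst i 0))
        (PySem.Int.toChars x)
    -- A = [x.split('#') for x in s.split()]
    let A : List (List (List Char)) := (PySem.Chars.split₀ s).map (fun x => PySem.Chars.splitOn x ['#'])
    -- res loop: res += ', ' + ', '.join(x)   or   res += ', ' + x[0] + '-' + x[-1]
    let res : List Char :=
      A.foldl
        (fun res x =>
          if x.length < 3 then
            res ++ [',', ' '] ++ PySem.Chars.join [',', ' '] x
          else
            res ++ [',', ' '] ++ PySem.List.pyGetD x 0 [] ++ ['-'] ++ PySem.List.pyGetD x (-1) [])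
        []
    -- return res[2:]
    String.ofList (PySem.List.slice res (some 2) none)

-- ===== PORT B =====
-- inner while loop of Source B: split off the maximal run continuing `prev` (run tail, remainder)
def pvTakeRun (prev : Int) : List Int → List Int × List Int
  | [] => ([], [])
  | y :: ys =>
    if prev + 1 = y then
      let p := pvTakeRun y ys
      (y :: p.1, p.2)
    else ([], y :: ys)

-- needed by pvRuns's termination proof
theorem pvTakeRun_snd_le (prev : Int) (l : List Int) : (pvTakeRun prev l).2.length ≤ l.length := by
  induction l generalizing prev with
  | nil => simp [pvTakeRun]
  | cons y ys ih =>
    simp only [pvTakeRun]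
    split
    · exact le_trans (ih y) (Nat.le_succ _)
    · simp

-- outer while loop of Source B: the list of maximal consecutive runs
def pvRuns : List Int → List (List Int)
  | [] => []
  | x :: xs => (x :: (pvTakeRun x xs).1) :: pvRuns (pvTakeRun x xs).2
  termination_by l => l.length
  decreasing_by exact Nat.lt_succ_of_le (pvTakeRun_snd_le x xs)

-- tokens of one run: "first-last" if len(run) >= 3, else str() of each element
def pvTok (r : List Int) : List (List Char) :=
  if 3 ≤ r.length then
    [PySem.Int.toChars (PySem.List.pyGetD r 0 0) ++ ['-'] ++ PySem.Int.toChars (PySem.List.pyGetD r (-1) 0)]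
  else r.map PySem.Int.toChars

def numbers_range_alt (lst : List Int) : String :=
  String.ofList (PySem.Chars.join [',', ' '] ((pvRuns lst).flatMap pvTok))

-- ===== PRECONDITION & SPEC =====
def Spec_numbers_range (lst : List Int) (out : String) : Prop := out = numbers_range_alt lst
instance (lst : List Int) (out : String) : Decidable (Spec_numbers_range lst out) := by unfold Spec_numbers_range; infer_instance

-- ===== CLAIM (what is proved, stated in full; the proofs are below) =====
def Claim_equal_numbers_range : Prop := ∀ (lst : List Int), Dom_numbers_range lst → Spec_numbers_range lst (numbers_range lst)

-- ===== LEMMAS AND PROOFS =====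

-- --- facts about str(n) = PySem.Int.toChars n : nonempty, chars are '-' or digits ---

theorem pv_toDigitsCore_len (f n : Nat) (l : List Char) :
    l.length ≤ (Nat.toDigitsCore 10 f n l).length := by
  induction f generalizing n l with
  | zero => simp [Nat.toDigitsCore]
  | succ f ih =>
    simp only [Nat.toDigitsCore]
    split
    · simp
    · exact le_trans (by simp) (ih (n / 10) ((n % 10).digitChar :: l))

theorem pv_mem_toDigitsCore (f n : Nat) (l : List Char) (c : Char)
    (hc : c ∈ Nat.toDigitsCore 10 f n l) : c ∈ l ∨ c.isDigit = true := by
  induction f generalizing n l with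
  | zero => exact Or.inl (by simpa [Nat.toDigitsCore] using hc)
  | succ f ih =>
    simp only [Nat.toDigitsCore] at hc
    have hd : ((n % 10).digitChar).isDigit = true := by
      have h10 : n % 10 < 10 := Nat.mod_lt _ (by omega)
      interval_cases h : n % 10 <;> decide
    split at hc
    · rcases List.mem_cons.mp hc with h | h
      · exact Or.inr (h ▸ hd)
      · exact Or.inl h
    · rcases ih _ _ hc with h | h
      · rcases List.mem_cons.mp h with h' | h'
        · exact Or.inr (h' ▸ hd)
        · exact Or.inl h'
      · exact Or.inr h

theorem pv_toChars_ne_nil (n : Int) : PySem.Int.toChars n ≠ [] := by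
  unfold PySem.Int.toChars
  split
  · simp
  · unfold Nat.toDigits
    intro h
    simp only [Nat.toDigitsCore] at h
    split at h
    · exact absurd h (by simp)
    · have := pv_toDigitsCore_len n.toNat (n.toNat / 10) [(n.toNat % 10).digitChar]
      rw [h] at this
      simp at this

theorem pv_mem_toChars (n : Int) (c : Char) (hc : c ∈ PySem.Int.toChars n) :
    c = '-' ∨ c.isDigit = true := by
  unfold PySem.Int.toChars at hc
  split at hc
  · rcases List.mem_cons.mp hc with h | h
    · exact Or.inl h
    · exact (pv_mem_toDigitsCore _ _ _ _ h).imp (by simp) id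
  · exact (pv_mem_toDigitsCore _ _ _ _ hc).imp (by simp) id

theorem pv_isDigit_not_space (c : Char) (h : c.isDigit = true) : PySem.Chars.isspace c = false := by
  simp [Char.isDigit] at h
  obtain ⟨h1, h2⟩ := h
  rw [UInt32.le_iff_toNat_le] at h1 h2
  have e : c.toNat = c.val.toNat := rfl
  have e1 : (48:UInt32).toNat = 48 := rfl
  have e2 : (57:UInt32).toNat = 57 := rfl
  simp only [PySem.Chars.isspace]
  simp only [Bool.or_eq_false_iff, Bool.and_eq_false_iff, decide_eq_false_iff_not]
  omega

theorem pv_toChars_not_space (n : Int) (c : Char) (hc : c ∈ PySem.Int.toChars n) :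
    PySem.Chars.isspace c = false := by
  rcases pv_mem_toChars n c hc with h | h
  · subst h; decide
  · exact pv_isDigit_not_space c h

theorem pv_toChars_ne_hash (n : Int) (c : Char) (hc : c ∈ PySem.Int.toChars n) : c ≠ '#' := by
  rcases pv_mem_toChars n c hc with h | h
  · subst h; decide
  · rintro rfl; simp [Char.isDigit] at h

-- --- index and range shifting ---

theorem pv_pyGetD_cons_shift {α : Type} (z : α) (zs : List α) (i : Int) (d : α) (h : 0 ≤ i) :
    PySem.List.pyGetD (z :: zs) (i + 1) d = PySem.List.pyGetD zs i d := by
  simp only [PySem.List.pyGetD, PySem.List.pyGet?, PySem.List.pyIdx?, List.length_cons]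
  rw [if_pos (by omega : (0:Int) ≤ i + 1), if_pos h]
  by_cases hlt : i < (zs.length : Int)
  · rw [if_pos (by push_cast; omega), if_pos hlt]
    have ht : (i + 1).toNat = i.toNat + 1 := by omega
    simp [ht]
  · rw [if_neg (by push_cast; omega), if_neg hlt]
    rfl

theorem pv_pyRange_succ (a b : Int) :
    PySem.List.pyRange (a + 1) (b + 1) 1 = (PySem.List.pyRange a b 1).map (· + 1) := by
  rw [PySem.List.pyRange_one, PySem.List.pyRange_one]
  have e : b + 1 - (a + 1) = b - a := by ring
  rw [e, List.map_map]
  exact List.map_congr_left (fun k _ => by simp; ring)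

-- --- the A-side string construction as a structural build over adjacent pairs ---

def pvTailBuild (prev : Int) : List Int → List Char
  | [] => []
  | y :: ys => (if prev + 1 = y then '#' else ' ') :: (PySem.Int.toChars y ++ pvTailBuild y ys)

theorem pv_fold_eq_tailBuild (xs : List Int) (x : Int) (init : List Char) :
    (PySem.List.pyRange 1 ((x :: xs).length : Int) 1).foldl
      (fun s i =>
        if PySem.List.pyGetD (x :: xs) (i - 1) 0 + 1 = PySem.List.pyGetD (x :: xs) i 0 then
          s ++ ['#'] ++ PySem.Int.toChars (PySem.List.pyGetD (x :: xs) i 0)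
        else
          s ++ [' '] ++ PySem.Int.toChars (PySem.List.pyGetD (x :: xs) i 0))
      init = init ++ pvTailBuild x xs := by
  induction xs generalizing x init with
  | nil =>
    rw [show ((([x] : List Int).length : Int) = 1) by simp]
    rw [PySem.List.pyRange_one_eq_nil (le_refl 1)]
    simp [pvTailBuild]
  | cons y ys ih =>
    have hlen : (((x :: y :: ys).length : Int)) = (ys.length : Int) + 2 := by push_cast [List.length_cons]; ring
    rw [hlen, PySem.List.pyRange_one_cons (by omega)]
    rw [List.foldl_cons]
    have g0 : PySem.List.pyGetD (x :: y :: ys) (1 - 1) 0 = x := by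
      norm_num [PySem.List.pyGetD_zero_cons]
    have g1 : PySem.List.pyGetD (x :: y :: ys) 1 0 = y := by
      have := pv_pyGetD_cons_shift x (y :: ys) 0 0 (le_refl 0)
      simpa [PySem.List.pyGetD_zero_cons] using this
    rw [g0, g1]
    rw [show (1:Int) + 1 = 2 by norm_num,
      show (ys.length : Int) + 2 = ((ys.length : Int) + 1) + 1 by ring,
      show (2:Int) = 1 + 1 by norm_num,
      pv_pyRange_succ 1 ((ys.length : Int) + 1), List.foldl_map]
    have hcong : ∀ (acc : List Char), ∀ i ∈ PySem.List.pyRange 1 ((ys.length : Int) + 1) 1,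
        (fun s i =>
          if PySem.List.pyGetD (x :: y :: ys) (i - 1) 0 + 1 = PySem.List.pyGetD (x :: y :: ys) i 0 then
            s ++ ['#'] ++ PySem.Int.toChars (PySem.List.pyGetD (x :: y :: ys) i 0)
          else
            s ++ [' '] ++ PySem.Int.toChars (PySem.List.pyGetD (x :: y :: ys) i 0)) acc (i + 1)
        = (fun s i =>
          if PySem.List.pyGetD (y :: ys) (i - 1) 0 + 1 = PySem.List.pyGetD (y :: ys) i 0 then
            s ++ ['#'] ++ PySem.Int.toChars (PySem.List.pyGetD (y :: ys) i 0)
          else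
            s ++ [' '] ++ PySem.Int.toChars (PySem.List.pyGetD (y :: ys) i 0)) acc i := by
      intro acc i hi
      rcases PySem.List.mem_pyRange_one.mp hi with ⟨hi1, _⟩
      simp only
      have s1 : PySem.List.pyGetD (x :: y :: ys) (i + 1) 0 = PySem.List.pyGetD (y :: ys) i 0 :=
        pv_pyGetD_cons_shift _ _ _ _ (by omega)
      have s2 : PySem.List.pyGetD (x :: y :: ys) (i + 1 - 1) 0 = PySem.List.pyGetD (y :: ys) (i - 1) 0 := by
        rw [show i + 1 - 1 = (i - 1) + 1 by ring]
        exact pv_pyGetD_cons_shift _ _ _ _ (by omega)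
      rw [s1, s2]
    rw [PySem.List.foldl_congr_mem _ _ _ _ hcong]
    rw [show ((ys.length : Int) + 1) = ((y :: ys).length : Int) by push_cast [List.length_cons]; ring]
    split_ifs with hxy
    · rw [ih]; simp [pvTailBuild, hxy]
    · rw [ih]; simp [pvTailBuild, hxy]

-- --- tailBuild in terms of runs ---

theorem pv_join_hash (x : Int) (r : List Int) :
    PySem.Chars.join ['#'] (PySem.Int.toChars x :: r.map PySem.Int.toChars)
      = PySem.Int.toChars x ++ r.flatMap (fun y => '#' :: PySem.Int.toChars y) := by
  induction r generalizing x with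
  | nil => simp [PySem.Chars.join_singleton]
  | cons z zs ih =>
    rw [List.map_cons, PySem.Chars.join_cons_cons, ih z]
    simp

def pvTailRest : List Int → List Char
  | [] => []
  | z :: zs => ' ' :: (PySem.Int.toChars z ++ pvTailBuild z zs)

theorem pv_G1 (xs : List Int) (x : Int) :
    pvTailBuild x xs =
      ((pvTakeRun x xs).1.flatMap (fun y => '#' :: PySem.Int.toChars y)) ++ pvTailRest (pvTakeRun x xs).2 := by
  induction xs generalizing x with
  | nil => simp [pvTailBuild, pvTakeRun, pvTailRest]
  | cons y ys ih =>
    simp only [pvTailBuild, pvTakeRun]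
    split_ifs with h
    · simp only [List.flatMap_cons]
      rw [ih y]
      simp
    · simp [pvTailRest]

theorem pv_tailBuild_runs (xs : List Int) (x : Int) :
    PySem.Int.toChars x ++ pvTailBuild x xs =
      PySem.Chars.join [' ']
        ((pvRuns (x :: xs)).map (fun r => PySem.Chars.join ['#'] (r.map PySem.Int.toChars))) := by
  rw [pv_G1]
  rw [show pvRuns (x :: xs) = (x :: (pvTakeRun x xs).1) :: pvRuns (pvTakeRun x xs).2 from by rw [pvRuns]]
  cases h2 : (pvTakeRun x xs).2 with
  | nil =>
    simp only [pvTailRest, List.append_nil, pvRuns, List.map_cons, List.map_nil,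
      PySem.Chars.join_singleton]
    rw [pv_join_hash]
  | cons z zs =>
    have hrec := pv_tailBuild_runs zs z
    simp only [pvRuns, List.map_cons] at hrec ⊢
    rw [PySem.Chars.join_cons_cons, ← hrec, pv_join_hash]
    simp [pvTailRest]
  termination_by xs.length
  decreasing_by
    have := pvTakeRun_snd_le x xs
    rw [h2] at this
    simp at this
    omega

theorem pv_runs_ne_nil (l : List Int) : ∀ r ∈ pvRuns l, r ≠ [] := by
  cases l with
  | nil => simp [pvRuns]
  | cons x xs =>
    rw [pvRuns]
    intro r hr
    rcases List.mem_cons.mp hr with h | h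
    · subst h; simp
    · exact pv_runs_ne_nil (pvTakeRun x xs).2 r h
  termination_by l.length
  decreasing_by exact Nat.lt_succ_of_le (pvTakeRun_snd_le x xs)

-- --- generic join facts ---

theorem pv_join_ne_nil (sep : List Char) (p : List Char) (ps : List (List Char)) (hp : p ≠ []) :
    PySem.Chars.join sep (p :: ps) ≠ [] := by
  cases ps with
  | nil => simpa [PySem.Chars.join_singleton] using hp
  | cons q rest =>
    rw [PySem.Chars.join_cons_cons]
    simp [hp]

theorem pv_mem_join (sep : List Char) (l : List (List Char)) (c : Char)
    (hc : c ∈ PySem.Chars.join sep l) : (∃ t ∈ l, c ∈ t) ∨ c ∈ sep := by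
  induction l with
  | nil => simp [PySem.Chars.join_nil] at hc
  | cons p ps ih =>
    cases ps with
    | nil =>
      rw [PySem.Chars.join_singleton] at hc
      exact Or.inl ⟨p, by simp, hc⟩
    | cons q rest =>
      rw [PySem.Chars.join_cons_cons] at hc
      rcases List.mem_append.mp hc with h | h
      · rcases List.mem_append.mp h with h' | h'
        · exact Or.inl ⟨p, by simp, h'⟩
        · exact Or.inr h'
      · rcases ih h with ⟨t, ht, hct⟩ | h'
        · exact Or.inl ⟨t, by simp [ht], hct⟩
        · exact Or.inr h'

-- --- s.split() recovers the space-joined parts ---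

theorem pv_go0_word (w rest cur : List Char) (acc : List (List Char))
    (hw : ∀ c ∈ w, PySem.Chars.isspace c = false) :
    PySem.Chars.split₀.go (w ++ rest) cur acc = PySem.Chars.split₀.go rest (w.reverse ++ cur) acc := by
  induction w generalizing cur with
  | nil => simp
  | cons c cs ih =>
    have hc := hw c (by simp)
    rw [List.cons_append,
      show PySem.Chars.split₀.go (c :: (cs ++ rest)) cur acc
        = PySem.Chars.split₀.go (cs ++ rest) (c :: cur) acc from by
          simp [PySem.Chars.split₀.go, hc]]
    rw [ih (c :: cur) (fun d hd => hw d (by simp [hd]))]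
    simp

theorem pv_go0_join (parts : List (List Char))
    (hne : ∀ p ∈ parts, p ≠ [])
    (hsp : ∀ p ∈ parts, ∀ c ∈ p, PySem.Chars.isspace c = false) :
    ∀ acc, PySem.Chars.split₀.go (PySem.Chars.join [' '] parts) [] acc = acc.reverse ++ parts := by
  induction parts with
  | nil => intro acc; simp [PySem.Chars.join_nil, PySem.Chars.split₀.go]
  | cons p ps ih =>
    intro acc
    cases ps with
    | nil =>
      rw [PySem.Chars.join_singleton, ← List.append_nil p,
        pv_go0_word p [] [] acc (fun c hc => hsp p (by simp) c hc)]
      have hp : p ≠ [] := hne p (by simp)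
      simp [PySem.Chars.split₀.go, hp]
    | cons q rest =>
      rw [PySem.Chars.join_cons_cons, List.append_assoc, List.singleton_append,
        pv_go0_word p _ [] acc (fun c hc => hsp p (by simp) c hc)]
      have hp : p ≠ [] := hne p (by simp)
      rw [show PySem.Chars.split₀.go (' ' :: PySem.Chars.join [' '] (q :: rest)) (p.reverse ++ []) acc
          = PySem.Chars.split₀.go (PySem.Chars.join [' '] (q :: rest)) [] ((p.reverse ++ []).reverse :: acc) from by
            simp [PySem.Chars.split₀.go, show PySem.Chars.isspace ' ' = true from by decide, hp]]
      rw [ih (fun t ht => hne t (by simp [ht])) (fun t ht => hsp t (by simp [ht]))]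
      simp

theorem pv_split₀_join (parts : List (List Char))
    (hne : ∀ p ∈ parts, p ≠ [])
    (hsp : ∀ p ∈ parts, ∀ c ∈ p, PySem.Chars.isspace c = false) :
    PySem.Chars.split₀ (PySem.Chars.join [' '] parts) = parts := by
  have := pv_go0_join parts hne hsp []
  simpa [PySem.Chars.split₀] using this

-- --- x.split('#') recovers the '#'-joined tokens ---

theorem pv_goH_nil (fuel : Nat) (cur : List Char) (acc : List (List Char)) :
    PySem.Chars.splitOn.go ['#'] fuel [] cur acc = (cur.reverse :: acc).reverse := by
  cases fuel <;> simp [PySem.Chars.splitOn.go]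

theorem pv_goH_word (w : List Char) : ∀ (rest cur : List Char) (fuel : Nat) (acc : List (List Char)),
    (∀ c ∈ w, c ≠ '#') → w.length ≤ fuel →
    PySem.Chars.splitOn.go ['#'] fuel (w ++ rest) cur acc
      = PySem.Chars.splitOn.go ['#'] (fuel - w.length) rest (w.reverse ++ cur) acc := by
  induction w with
  | nil => intro rest cur fuel acc _ _; simp
  | cons c cs ih =>
    intro rest cur fuel acc hw hf
    obtain ⟨f, rfl⟩ : ∃ f, fuel = f + 1 := ⟨fuel - 1, by simp at hf; omega⟩
    have hc : c ≠ '#' := hw c (by simp)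
    rw [List.cons_append,
      show PySem.Chars.splitOn.go ['#'] (f + 1) (c :: (cs ++ rest)) cur acc
        = PySem.Chars.splitOn.go ['#'] f (cs ++ rest) (c :: cur) acc from by
          simp [PySem.Chars.splitOn.go, List.isPrefixOf, Ne.symm hc]]
    rw [ih rest (c :: cur) f acc (fun d hd => hw d (by simp [hd])) (by simp at hf; omega)]
    simp

theorem pv_goH_join (toks : List (List Char))
    (hh : ∀ t ∈ toks, ∀ c ∈ t, c ≠ '#') :
    ∀ (acc : List (List Char)) (fuel : Nat), (PySem.Chars.join ['#'] toks).length < fuel → toks ≠ [] →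
    PySem.Chars.splitOn.go ['#'] fuel (PySem.Chars.join ['#'] toks) [] acc = acc.reverse ++ toks := by
  induction toks with
  | nil => intro _ _ _ h; exact absurd rfl h
  | cons p ps ih =>
    intro acc fuel hf _
    cases ps with
    | nil =>
      rw [PySem.Chars.join_singleton] at hf ⊢
      rw [← List.append_nil p, pv_goH_word p [] [] fuel acc (fun c hc => hh p (by simp) c hc) (by omega)]
      rw [pv_goH_nil]
      simp
    | cons q rest =>
      rw [PySem.Chars.join_cons_cons] at hf ⊢
      rw [List.append_assoc, List.singleton_append,
        pv_goH_word p _ [] fuel acc (fun c hc => hh p (by simp) c hc)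
          (by simp [List.length_append] at hf; omega)]
      obtain ⟨f, hfeq⟩ : ∃ f, fuel - p.length = f + 1 :=
        ⟨fuel - p.length - 1, by simp [List.length_append] at hf; omega⟩
      rw [hfeq,
        show PySem.Chars.splitOn.go ['#'] (f + 1) ('#' :: PySem.Chars.join ['#'] (q :: rest)) (p.reverse ++ []) acc
          = PySem.Chars.splitOn.go ['#'] f (PySem.Chars.join ['#'] (q :: rest)) [] ((p.reverse ++ []).reverse :: acc) from by
            simp [PySem.Chars.splitOn.go, List.isPrefixOf]]
      rw [ih (fun t ht => hh t (by simp [ht]) ) _ f (by simp [List.length_append] at hf; omega) (by simp)]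
      simp

theorem pv_splitOn_join (toks : List (List Char)) (hne : toks ≠ [])
    (hh : ∀ t ∈ toks, ∀ c ∈ t, c ≠ '#') :
    PySem.Chars.splitOn (PySem.Chars.join ['#'] toks) ['#'] = toks := by
  have := pv_goH_join toks hh [] ((PySem.Chars.join ['#'] toks).length + 1) (by omega) hne
  simpa [PySem.Chars.splitOn] using this

-- --- the res loop and the final slice ---

theorem pv_pre_join (toks : List (List Char)) (h : toks ≠ []) :
    ',' :: ' ' :: PySem.Chars.join [',', ' '] toks = toks.flatMap (fun t => ',' :: ' ' :: t) := by
  induction toks with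
  | nil => exact absurd rfl h
  | cons t ts ih =>
    cases ts with
    | nil => simp [PySem.Chars.join_singleton]
    | cons q rest =>
      rw [PySem.Chars.join_cons_cons, List.flatMap_cons, ← ih (by simp)]
      simp

theorem pv_drop2 (toks : List (List Char)) :
    (toks.flatMap (fun t => ',' :: ' ' :: t)).drop 2 = PySem.Chars.join [',', ' '] toks := by
  cases toks with
  | nil => simp [PySem.Chars.join_nil]
  | cons t ts =>
    rw [← pv_pre_join (t :: ts) (by simp)]
    simp

theorem pv_resBody (r : List Int) (hr : r ≠ []) :
    (if (r.map PySem.Int.toChars).length < 3 then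
        [',', ' '] ++ PySem.Chars.join [',', ' '] (r.map PySem.Int.toChars)
      else
        [',', ' '] ++ PySem.List.pyGetD (r.map PySem.Int.toChars) 0 [] ++ ['-']
          ++ PySem.List.pyGetD (r.map PySem.Int.toChars) (-1) [])
      = (pvTok r).flatMap (fun t => ',' :: ' ' :: t) := by
  cases r with
  | nil => exact absurd rfl hr
  | cons z rest =>
    by_cases h3 : (z :: rest).length < 3
    · rw [if_pos (by simpa using h3)]
      unfold pvTok
      rw [if_neg (by omega)]
      rw [← pv_pre_join ((z :: rest).map PySem.Int.toChars) (by simp)]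
      simp
    · rw [if_neg (by simpa using h3)]
      unfold pvTok
      rw [if_pos (by omega)]
      have hmapne : (z :: rest).map PySem.Int.toChars ≠ [] := by simp
      have e0 : PySem.List.pyGetD ((z :: rest).map PySem.Int.toChars) 0 []
          = PySem.Int.toChars (PySem.List.pyGetD (z :: rest) 0 0) := by
        simp [PySem.List.pyGetD_zero_cons]
      have e1 : PySem.List.pyGetD ((z :: rest).map PySem.Int.toChars) (-1) []
          = PySem.Int.toChars (PySem.List.pyGetD (z :: rest) (-1) 0) := by
        rw [PySem.List.pyGetD_neg_one _ _ hmapne, PySem.List.pyGetD_neg_one _ _ (by simp)]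
        exact List.getLast_map (by simp)
      rw [e0, e1]
      simp

theorem pv_res_final (runsL : List (List Int)) (hne : ∀ r ∈ runsL, r ≠ []) :
    PySem.List.slice
      ((runsL.map (fun r => r.map PySem.Int.toChars)).foldl
        (fun res x =>
          if x.length < 3 then
            res ++ [',', ' '] ++ PySem.Chars.join [',', ' '] x
          else
            res ++ [',', ' '] ++ PySem.List.pyGetD x 0 [] ++ ['-'] ++ PySem.List.pyGetD x (-1) [])
        []) (some 2) none
    = PySem.Chars.join [',', ' '] (runsL.flatMap pvTok) := by
  have hb : (fun (res : List Char) (x : List (List Char)) =>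
        if x.length < 3 then
          res ++ [',', ' '] ++ PySem.Chars.join [',', ' '] x
        else
          res ++ [',', ' '] ++ PySem.List.pyGetD x 0 [] ++ ['-'] ++ PySem.List.pyGetD x (-1) [])
      = (fun res x => res ++
          (if x.length < 3 then
            [',', ' '] ++ PySem.Chars.join [',', ' '] x
          else
            [',', ' '] ++ PySem.List.pyGetD x 0 [] ++ ['-'] ++ PySem.List.pyGetD x (-1) [])) := by
    funext res x
    split_ifs <;> simp
  rw [hb, PySem.List.foldl_append_eq_flatMap, List.nil_append]
  have h1 : (runsL.map (fun r => r.map PySem.Int.toChars)).flatMap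
        (fun x =>
          if x.length < 3 then
            [',', ' '] ++ PySem.Chars.join [',', ' '] x
          else
            [',', ' '] ++ PySem.List.pyGetD x 0 [] ++ ['-'] ++ PySem.List.pyGetD x (-1) [])
      = (runsL.flatMap pvTok).flatMap (fun t => ',' :: ' ' :: t) := by
    induction runsL with
    | nil => simp
    | cons r rs ih =>
      rw [List.map_cons, List.flatMap_cons, List.flatMap_cons, List.flatMap_append]
      rw [pv_resBody r (hne r (by simp)), ih (fun t ht => hne t (by simp [ht]))]
  rw [h1, show PySem.List.slice ((runsL.flatMap pvTok).flatMap (fun t => ',' :: ' ' :: t)) (some 2) none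
      = ((runsL.flatMap pvTok).flatMap (fun t => ',' :: ' ' :: t)).drop 2 from by
        simpa using PySem.List.slice_from_natCast ((runsL.flatMap pvTok).flatMap (fun t => ',' :: ' ' :: t)) 2]
  exact pv_drop2 _

-- ===== VERDICT (by name: the statement is the Claim_ definition above) =====
theorem numbers_range_spec : Claim_equal_numbers_range := by
  intro lst _
  unfold Spec_numbers_range
  cases lst with
  | nil =>
    simp only [numbers_range, numbers_range_alt, pvRuns, List.flatMap_nil, PySem.Chars.join_nil]
  | cons x xs =>
    simp only [numbers_range, numbers_range_alt]
    rw [pv_fold_eq_tailBuild xs x (PySem.Int.toChars x), pv_tailBuild_runs xs x]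
    rw [pv_split₀_join _
      (by
        intro p hp
        rcases List.mem_map.mp hp with ⟨r, hr, rfl⟩
        have hrne := pv_runs_ne_nil _ r hr
        cases r with
        | nil => exact absurd rfl hrne
        | cons z rest =>
          rw [List.map_cons]
          exact pv_join_ne_nil _ _ _ (pv_toChars_ne_nil z))
      (by
        intro p hp c hc
        rcases List.mem_map.mp hp with ⟨r, hr, rfl⟩
        rcases pv_mem_join _ _ _ hc with ⟨t, ht, hct⟩ | h
        · rcases List.mem_map.mp ht with ⟨n, _, rfl⟩
          exact pv_toChars_not_space n c hct
        · simp at h; subst h; decide)]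
    rw [List.map_map]
    rw [List.map_congr_left (fun r hr => by
      show PySem.Chars.splitOn (PySem.Chars.join ['#'] (r.map PySem.Int.toChars)) ['#'] = r.map PySem.Int.toChars
      exact pv_splitOn_join _ (by simpa using pv_runs_ne_nil _ r hr)
        (by
          intro t ht c hc
          rcases List.mem_map.mp ht with ⟨n, _, rfl⟩
          exact pv_toChars_ne_hash n c hc))]
    rw [pv_res_final _ (pv_runs_ne_nil _)]
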